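-- pv_equiv track=rewrite | github.com/kodsnack/advent_of_code_2017 | meldanya-python3/day24/day24.py | part2
-- ===== SOURCE A (Python) =====
-- def _strength(bridge):
--     return sum([sum(b) for b in bridge])
--
-- def part2(bridges):
--     longest = []
--     for b in bridges:
--         if len(longest) == len(b):
--             longest = max(longest, b, key=_strength)
--         else:
--             longest = max(longest, b, key=len)
--     return _strength(longest)
-- ===== SOURCE B (Python) =====
-- def part2(bridges):
--     if not bridges:
--         return 0
--     max_len = max(len(b) for b in bridges)
--     return max(sum(x + y for x, y in b) for b in bridges if len(b) == max_len)
-- ===== Notes on version B (the rewrite author's own statement) =====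
-- stated objective: simpler
-- what changed: Replaced A's single running-best loop that interleaves a length comparison with a strength comparison by two independent passes: one max over the lengths, then one max over the strengths of the bridges of that maximal length.
import Mathlib
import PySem

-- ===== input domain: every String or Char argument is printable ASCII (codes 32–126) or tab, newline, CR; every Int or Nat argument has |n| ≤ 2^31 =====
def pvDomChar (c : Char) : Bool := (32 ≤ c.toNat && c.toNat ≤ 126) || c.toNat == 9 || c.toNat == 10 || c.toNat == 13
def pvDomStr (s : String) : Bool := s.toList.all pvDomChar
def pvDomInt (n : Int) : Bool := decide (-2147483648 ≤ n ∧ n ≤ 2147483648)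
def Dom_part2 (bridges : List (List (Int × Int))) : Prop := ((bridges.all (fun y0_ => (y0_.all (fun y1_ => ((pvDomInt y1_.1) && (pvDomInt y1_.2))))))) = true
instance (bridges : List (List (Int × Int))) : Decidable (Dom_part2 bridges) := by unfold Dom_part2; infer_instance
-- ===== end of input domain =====

-- B replaces A's single running-best loop (interleaved length/strength comparisons) with two
-- independent passes: max length first, then max strength among the bridges of that length.

-- ===== PORT A =====
-- _strength(bridge) = sum([sum(b) for b in bridge]), each b a 2-tuple
def pvStrengthA (bridge : List (Int × Int)) : Int := (bridge.map (fun b => b.1 + b.2)).sum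

-- for-loop over bridges with running 'longest'; Python's max(x, y, key=f) = y if f x < f y else x
def part2 (bridges : List (List (Int × Int))) : Int :=
  pvStrengthA (bridges.foldl (fun longest b =>
    if longest.length = b.length then
      (if pvStrengthA longest < pvStrengthA b then b else longest)
    else
      (if longest.length < b.length then b else longest)) [])

-- ===== PORT B =====
-- sum(x + y for x, y in b)
def pvStrengthB (b : List (Int × Int)) : Int := b.foldl (fun acc p => acc + (p.1 + p.2)) 0

def part2_alt (bridges : List (List (Int × Int))) : Int :=
  match bridges with
  | [] => 0
  | _ :: _ =>
    match PySem.List.max? (bridges.map (fun b => (b.length : Int))) (fun x => x) with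
    | none => 0
    | some maxLen =>
      match PySem.List.max? ((bridges.filter (fun b => (b.length : Int) == maxLen)).map pvStrengthB) (fun x => x) with
      | none => 0
      | some s => s

-- ===== PRECONDITION & SPEC =====
def Spec_part2 (bridges : List (List (Int × Int))) (out : Int) : Prop := out = part2_alt bridges
instance (bridges : List (List (Int × Int))) (out : Int) : Decidable (Spec_part2 bridges out) := by unfold Spec_part2; infer_instance

-- ===== CLAIM (what is proved, stated in full; the proofs are below) =====
def Claim_equal_part2 : Prop := ∀ (bridges : List (List (Int × Int))), Dom_part2 bridges → Spec_part2 bridges (part2 bridges)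

-- ===== LEMMAS AND PROOFS =====

-- 'x is at most r' in A's running order: shorter, or same length with no larger strength
def pvLexLE (x r : List (Int × Int)) : Prop :=
  x.length < r.length ∨ (x.length = r.length ∧ pvStrengthA x ≤ pvStrengthA r)

lemma pvLexLE_refl (x : List (Int × Int)) : pvLexLE x x := Or.inr ⟨rfl, le_refl _⟩

lemma pvLexLE_trans {a b c : List (Int × Int)} (h1 : pvLexLE a b) (h2 : pvLexLE b c) : pvLexLE a c := by
  rcases h1 with h1 | ⟨h1, h1'⟩ <;> rcases h2 with h2 | ⟨h2, h2'⟩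
  · exact Or.inl (h1.trans h2)
  · exact Or.inl (h2 ▸ h1)
  · exact Or.inl (h1 ▸ h2)
  · exact Or.inr ⟨h1.trans h2, le_trans h1' h2'⟩

-- A's loop body
def pvStepA (longest b : List (Int × Int)) : List (Int × Int) :=
  if longest.length = b.length then
    (if pvStrengthA longest < pvStrengthA b then b else longest)
  else
    (if longest.length < b.length then b else longest)

lemma pvStepA_cases (L b : List (Int × Int)) :
    (pvStepA L b = L ∨ pvStepA L b = b) ∧ pvLexLE L (pvStepA L b) ∧ pvLexLE b (pvStepA L b) := by
  unfold pvStepA pvLexLE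
  split_ifs with h1 h2 h3 <;> refine ⟨by tauto, ?_, ?_⟩ <;> omega

lemma pvLoopA_spec (bs : List (List (Int × Int))) :
    ∀ L, (bs.foldl pvStepA L = L ∨ bs.foldl pvStepA L ∈ bs) ∧
      pvLexLE L (bs.foldl pvStepA L) ∧ (∀ x ∈ bs, pvLexLE x (bs.foldl pvStepA L)) := by
  induction bs with
  | nil => intro L; exact ⟨Or.inl rfl, pvLexLE_refl L, by simp⟩
  | cons b bs ih =>
    intro L
    obtain ⟨hmem, hL, hall⟩ := ih (pvStepA L b)
    obtain ⟨hstep, hsL, hsb⟩ := pvStepA_cases L b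
    have hfold : (b :: bs).foldl pvStepA L = bs.foldl pvStepA (pvStepA L b) := rfl
    rw [hfold]
    refine ⟨?_, pvLexLE_trans hsL hL, ?_⟩
    · rcases hmem with h | h
      · rcases hstep with h' | h'
        · exact Or.inl (h.trans h')
        · rw [h, h']; exact Or.inr List.mem_cons_self
      · exact Or.inr (List.mem_cons_of_mem _ h)
    · intro x hx
      rcases List.mem_cons.mp hx with rfl | hx
      · exact pvLexLE_trans hsb hL
      · exact hall x hx

lemma pvStrengthB_eq (b : List (Int × Int)) : pvStrengthB b = pvStrengthA b := by
  unfold pvStrengthB pvStrengthA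
  induction b with
  | nil => rfl
  | cons p t ih =>
    simp only [List.foldl_cons, List.map_cons, List.sum_cons]
    rw [show (0 : Int) + (p.1 + p.2) = p.1 + p.2 + 0 by ring]
    rw [PySem.List.foldl_add]
    omega

-- ===== VERDICT (by name: the statement is the Claim_ definition above) =====
theorem part2_spec : Claim_equal_part2 := by
  intro bridges _
  unfold Spec_part2
  match bridges with
  | [] => rfl
  | h :: t =>
    obtain ⟨hmem0, -, hall⟩ := pvLoopA_spec (h :: t) []
    -- the loop's result is a member of the input list
    have hrmem : (h :: t).foldl pvStepA [] ∈ h :: t := by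
      rcases hmem0 with hnil | hm
      · have hh := hall h List.mem_cons_self
        rw [hnil] at hh ⊢
        rcases hh with hh | ⟨hh, -⟩
        · simp at hh
        · simp only [List.length_nil] at hh
          have : h = [] := List.eq_nil_of_length_eq_zero hh
          rw [← this]; exact List.mem_cons_self
      · exact hm
    have hA : part2 (h :: t) = pvStrengthA ((h :: t).foldl pvStepA []) := rfl
    -- the first max? in part2_alt: its value is the loop result's length
    obtain ⟨m, hm⟩ : ∃ m, PySem.List.max? ((h :: t).map (fun b => (b.length : Int))) (fun x => x) = some m := by
      cases hmax : PySem.List.max? ((h :: t).map (fun b => (b.length : Int))) (fun x => x) with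
      | none => rw [PySem.List.max?_eq_none_iff] at hmax; simp at hmax
      | some m => exact ⟨m, rfl⟩
    have hmmem := PySem.List.max?_mem hm
    have hmmax := PySem.List.max?_isMax hm
    have hm_eq : m = (((h :: t).foldl pvStepA []).length : Int) := by
      obtain ⟨b, hb, hbm⟩ := List.mem_map.mp hmmem
      have hle : ((((h :: t).foldl pvStepA []).length : Int)) ≤ m :=
        hmmax _ (List.mem_map_of_mem hrmem)
      have hlex := hall b hb
      have hbr : b.length ≤ ((h :: t).foldl pvStepA []).length := by
        rcases hlex with h' | ⟨h', -⟩ <;> omega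
      omega
    -- the filtered list contains the loop result
    have hrflt : (h :: t).foldl pvStepA [] ∈ (h :: t).filter (fun b => (b.length : Int) == m) := by
      rw [List.mem_filter]
      exact ⟨hrmem, by simp [hm_eq]⟩
    -- the second max?: its value is the loop result's strength
    obtain ⟨s, hs⟩ : ∃ s, PySem.List.max?
        (((h :: t).filter (fun b => (b.length : Int) == m)).map pvStrengthB) (fun x => x) = some s := by
      cases hmax : PySem.List.max?
          (((h :: t).filter (fun b => (b.length : Int) == m)).map pvStrengthB) (fun x => x) with
      | none =>
        rw [PySem.List.max?_eq_none_iff, List.map_eq_nil_iff] at hmax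
        rw [hmax] at hrflt; simp at hrflt
      | some s => exact ⟨s, rfl⟩
    have hsmem := PySem.List.max?_mem hs
    have hsmax := PySem.List.max?_isMax hs
    have hs_eq : s = pvStrengthA ((h :: t).foldl pvStepA []) := by
      obtain ⟨b, hb, hbs'⟩ := List.mem_map.mp hsmem
      obtain ⟨hbmem, hblen⟩ := List.mem_filter.mp hb
      have hblen' : (b.length : Int) = m := by simpa using hblen
      have hlex := hall b hbmem
      have hb_le : pvStrengthA b ≤ pvStrengthA ((h :: t).foldl pvStepA []) := by
        rcases hlex with h' | ⟨-, h'⟩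
        · omega
        · exact h'
      have h1 : s ≤ pvStrengthA ((h :: t).foldl pvStepA []) := by
        rw [← hbs', pvStrengthB_eq]; exact hb_le
      have h2 : pvStrengthA ((h :: t).foldl pvStepA []) ≤ s := by
        have := hsmax (pvStrengthB ((h :: t).foldl pvStepA [])) (List.mem_map_of_mem hrflt)
        rwa [pvStrengthB_eq] at this
      omega
    have hB : part2_alt (h :: t) = s := by
      simp only [part2_alt, hm, hs]
    rw [hA, hB, hs_eq]
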